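-- pv_equiv track=rewrite | github.com/fspv/learning | hacker-cup/2020/qualification_round/D1/running_on_fumes_chapter_1.py | road_graph
-- ===== SOURCE A (Python) =====
-- from typing import List, Iterator, Tuple, Set
--
-- def road_graph(cities: int) -> List[Set[int]]:
--     graph: List[Set[int]] = [set() for _ in range(cities)]
--
--     for pos in range(cities):
--         if pos > 0:
--             graph[pos].add(pos - 1)
--             graph[pos - 1].add(pos)
--         if pos < cities - 1:
--             graph[pos].add(pos + 1)
--             graph[pos + 1].add(pos)
--
--     return graph
-- ===== SOURCE B (Python) =====
-- from typing import List, Set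
--
-- def road_graph(cities: int) -> List[Set[int]]:
--     if cities <= 0:
--         return []
--     if cities == 1:
--         return [set()]
--     return [{1}] + [{i - 1, i + 1} for i in range(1, cities - 1)] + [{cities - 2}]
-- ===== Notes on version B (the rewrite author's own statement) =====
-- stated objective: simpler
-- what changed: Replaces A's edge-centric loop that mutates two neighbours' sets per iteration with a loop-free piecewise construction: early returns for the degenerate sizes, then the concatenation of the first vertex's segment, the interior vertices' predecessor-and-successor sets, and the last vertex's segment, with no bounds checks or mutation at all.
import Mathlib
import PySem

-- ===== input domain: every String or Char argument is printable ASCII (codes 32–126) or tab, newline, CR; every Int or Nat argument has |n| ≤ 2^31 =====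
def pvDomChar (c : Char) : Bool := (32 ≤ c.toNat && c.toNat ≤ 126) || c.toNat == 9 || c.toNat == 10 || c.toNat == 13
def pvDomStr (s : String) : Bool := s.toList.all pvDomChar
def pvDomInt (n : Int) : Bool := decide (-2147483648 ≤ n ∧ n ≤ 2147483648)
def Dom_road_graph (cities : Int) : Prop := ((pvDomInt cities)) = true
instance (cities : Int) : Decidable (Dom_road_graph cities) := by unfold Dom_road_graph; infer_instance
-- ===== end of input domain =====

-- B replaces A's edge-centric loop (which mutates two neighbours' sets per iteration) with a loop-free
-- piecewise construction: early returns for the degenerate sizes, then first ++ interior ++ last segment;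
-- objective: simpler.

-- ===== PORT A =====
-- one iteration of A's 'for pos in range(cities)' body (the four graph[...].add mutations)
def roadStep (cities : Int) (g : List (List Int)) (pos : Int) : List (List Int) :=
  let g1 :=
    if pos > 0 then
      (g.modify pos.toNat (fun s => PySem.Set.add s (pos - 1))).modify
        (pos - 1).toNat (fun s => PySem.Set.add s pos)
    else g
  if pos < cities - 1 then
    (g1.modify pos.toNat (fun s => PySem.Set.add s (pos + 1))).modify
      (pos + 1).toNat (fun s => PySem.Set.add s pos)
  else g1

def road_graph (cities : Int) : List (List Int) :=
  (PySem.List.pyRange 0 cities 1).foldl (roadStep cities)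
    ((PySem.List.pyRange 0 cities 1).map (fun _ => ([] : List Int)))

-- ===== PORT B =====
def road_graph_alt (cities : Int) : List (List Int) :=
  if cities ≤ 0 then []
  else if cities = 1 then [[]]
  else
    [PySem.Set.ofList [1]] ++
      (PySem.List.pyRange 1 (cities - 1) 1).map
        (fun i => PySem.Set.ofList [i - 1, i + 1]) ++
      [PySem.Set.ofList [cities - 2]]

-- ===== PRECONDITION & SPEC =====
def Spec_road_graph (cities : Int) (out : List (List Int)) : Prop := out = road_graph_alt cities
instance (cities : Int) (out : List (List Int)) : Decidable (Spec_road_graph cities out) := by unfold Spec_road_graph; infer_instance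

-- ===== CLAIM (what is proved, stated in full; the proofs are below) =====
def Claim_equal_road_graph : Prop := ∀ (cities : Int), Dom_road_graph cities → Spec_road_graph cities (road_graph cities)

-- ===== LEMMAS AND PROOFS =====

-- the final neighbour set of vertex i in a path on n vertices, in A's insertion order
def finSet (n i : Nat) : List Int :=
  (if 1 ≤ i then [(i : Int) - 1] else []) ++ (if i + 1 < n then [(i : Int) + 1] else [])

-- the half-built set of the vertex A's loop is about to visit
def pend (k : Nat) : List Int := if 1 ≤ k then [(k : Int) - 1] else []

lemma range0 (n : Nat) :
    PySem.List.pyRange 0 (n : Int) 1 = (List.range n).map (fun (k : Nat) => (k : Int)) := by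
  rw [PySem.List.pyRange_one]
  have h : ((n : Int) - 0).toNat = n := by omega
  rw [h]
  refine List.map_congr_left ?_
  intro k _
  simp

lemma step_eq (n k : Nat) (hk : k < n) :
    roadStep (n : Int)
      ((List.range n).map (fun i => if i < k then finSet n i else if i = k then pend k else []))
      (k : Int)
    = (List.range n).map
        (fun i => if i < k + 1 then finSet n i else if i = k + 1 then pend (k + 1) else []) := by
  have t0 : ((k : Int)).toNat = k := by omega
  have t1 : ((k : Int) - 1).toNat = k - 1 := by omega
  have t2 : ((k : Int) + 1).toNat = k + 1 := by omega
  unfold roadStep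
  split_ifs with h1 h2 h2 <;>
  · apply List.ext_getElem
    · simp
    · intro i hi hi'
      have hin : i < n := by simpa using hi'
      simp only [List.getElem_modify, List.getElem_map, List.getElem_range, t0, t1, t2]
      split_ifs
      all_goals try (exfalso; omega)
      all_goals try rfl
      all_goals simp only [finSet, pend, PySem.Set.add_eq_ite, List.mem_append]
      all_goals split_ifs
      all_goals simp only [List.mem_append, List.mem_cons,
        List.not_mem_nil, or_false] at *
      all_goals try (exfalso; omega)
      all_goals simp only [List.append_nil, List.nil_append,
        List.cons_append, List.cons.injEq, and_true]
      all_goals try omega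
      all_goals exact absurd trivial ‹¬True›

lemma foldl_inv (n : Nat) (k : Nat) (hk : k ≤ n) :
    ((List.range k).map (fun (j : Nat) => (j : Int))).foldl (roadStep (n : Int))
      ((List.range n).map (fun _ => ([] : List Int)))
    = (List.range n).map
        (fun i => if i < k then finSet n i else if i = k then pend k else []) := by
  induction k with
  | zero => simp [pend]
  | succ k ih =>
      rw [List.range_succ, List.map_append, List.foldl_append, ih (by omega)]
      simpa using step_eq n k (by omega)

-- A's whole loop produces exactly the map of finSet over the vertices
lemma road_graph_eq_finSet (n : Nat) :
    road_graph (n : Int) = (List.range n).map (fun i => finSet n i) := by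
  unfold road_graph
  rw [range0, List.map_map]
  rw [show (fun _ => ([] : List Int)) ∘ (fun (k : Nat) => (k : Int))
      = (fun (_ : Nat) => ([] : List Int)) from rfl]
  rw [foldl_inv n n le_rfl]
  refine List.map_congr_left ?_
  intro i hi
  have hin : i < n := List.mem_range.mp hi
  simp [hin]

-- ===== VERDICT (by name: the statement is the Claim_ definition above) =====
theorem road_graph_spec : Claim_equal_road_graph := by
  intro cities _
  unfold Spec_road_graph road_graph_alt
  by_cases h0 : cities ≤ 0
  · rw [if_pos h0]
    unfold road_graph
    rw [PySem.List.pyRange_one_eq_nil (by omega)]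
    simp
  · obtain ⟨n, rfl⟩ : ∃ n : Nat, cities = (n : Int) := ⟨cities.toNat, by omega⟩
    rw [if_neg h0]
    rw [road_graph_eq_finSet]
    by_cases h1 : (n : Int) = 1
    · obtain rfl : n = 1 := by omega
      decide
    · rw [if_neg h1]
      have hn2 : 2 ≤ n := by omega
      have hr : PySem.List.pyRange 1 ((n : Int) - 1) 1
          = (List.range (n - 2)).map (fun (k : Nat) => ((k : Int) + 1)) := by
        rw [PySem.List.pyRange_one]
        have h : (((n : Int) - 1) - 1).toNat = n - 2 := by omega
        rw [h]
        refine List.map_congr_left ?_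
        intro k _
        ring
      rw [hr, List.map_map]
      have hrange : List.range n
          = ([0] ++ (List.range (n - 2)).map (fun k => k + 1)) ++ [n - 1] := by
        have e1 : List.range n = List.range (n - 1) ++ [n - 1] := by
          conv_lhs => rw [show n = (n - 1) + 1 from by omega]
          rw [List.range_succ]
        have e2 : List.range (n - 1) = 0 :: (List.range (n - 2)).map (fun k => k + 1) := by
          conv_lhs => rw [show n - 1 = (n - 2) + 1 from by omega]
          rw [List.range_succ_eq_map]
        rw [e1, e2]
        rfl
      rw [hrange, List.map_append, List.map_append, List.map_map]
      congr 1
      congr 1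
      · -- first vertex
        simp only [List.map_cons, List.map_nil]
        have : finSet n 0 = PySem.Set.ofList [1] := by
          simp [finSet, PySem.Set.ofList]
          omega
        rw [this]
      · -- interior vertices
        refine List.map_congr_left ?_
        intro k hk
        have hk' : k < n - 2 := List.mem_range.mp hk
        simp only [Function.comp]
        have ha : 1 ≤ k + 1 := by omega
        have hb : k + 1 + 1 < n := by omega
        simp [finSet, ha, hb, PySem.Set.ofList, PySem.Set.add]
        omega
      · -- last vertex
        simp only [List.map_cons, List.map_nil]
        have ha : 1 ≤ n - 1 := by omega
        have hb : ¬ (n - 1 + 1 < n) := by omega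
        have : finSet n (n - 1) = PySem.Set.ofList [(n : Int) - 2] := by
          simp [finSet, ha, hb, PySem.Set.ofList]
          omega
        rw [this]
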